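-- pv_equiv track=rewrite | github.com/realteamprinz/brother-skill | src/sources/discord.py | _find_catchphrases
-- ===== SOURCE A (Python) =====
-- def _find_catchphrases(texts: list, min_occurrences: int = 3) -> list:
--     """Find repeated phrases across messages."""
--     phrase_counts = {}
--     for text in texts:
--         normalized = text.lower().strip()
--         if len(normalized) < 50:
--             phrase_counts[normalized] = phrase_counts.get(normalized, 0) + 1
--     return [p for p, c in sorted(phrase_counts.items(), key=lambda x: -x[1])
--             if c >= min_occurrences][:5]
-- ===== SOURCE B (Python) =====
-- def _find_catchphrases(texts: list, min_occurrences: int = 3) -> list: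
--     """Find repeated phrases across messages (bucket-by-count instead of sorting)."""
--     counts = {}
--     for text in texts:
--         normalized = text.lower().strip()
--         if len(normalized) < 50:
--             counts[normalized] = counts.get(normalized, 0) + 1
--     buckets = {}
--     for phrase, c in counts.items():
--         buckets.setdefault(c, []).append(phrase)
--     lo = max(min_occurrences, 1)
--     result = []
--     for c in range(max(buckets, default=0), lo - 1, -1):
--         result += buckets.get(c, [])
--     return result[:5]
-- ===== Notes on version B (the rewrite author's own statement) =====
-- stated objective: alternative
-- what changed: Instead of sorting the count dict by descending count and filtering, B inverts the counts into count->phrases buckets (insertion order preserved) and walks the count values from the maximum down to the threshold, concatenating buckets and taking the first 5.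
import Mathlib
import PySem

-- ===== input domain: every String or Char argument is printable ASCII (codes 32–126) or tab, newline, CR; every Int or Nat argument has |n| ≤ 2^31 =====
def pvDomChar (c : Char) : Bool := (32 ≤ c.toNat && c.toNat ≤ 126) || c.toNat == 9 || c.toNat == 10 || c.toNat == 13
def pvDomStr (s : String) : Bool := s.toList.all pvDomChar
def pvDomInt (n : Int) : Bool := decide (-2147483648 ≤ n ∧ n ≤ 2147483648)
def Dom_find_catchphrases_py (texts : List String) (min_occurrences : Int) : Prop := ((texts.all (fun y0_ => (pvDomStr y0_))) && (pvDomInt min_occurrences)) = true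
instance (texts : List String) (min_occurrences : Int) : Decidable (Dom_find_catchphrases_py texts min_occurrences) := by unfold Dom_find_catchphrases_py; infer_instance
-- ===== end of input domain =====

-- B replaces A's sort-by-count with count buckets walked from the highest count down (same values; no speed claim).

-- shared helper: both A and B start with the identical counting loop
def pvNorm (t : String) : String := PySem.Str.strip (PySem.Str.lower t)

def pvCountPhrases (texts : List String) : PySem.Dict String Int :=
  texts.foldl (fun d text =>
    let normalized := pvNorm text
    if PySem.Str.len normalized < 50 then d.insert normalized (d.getD normalized 0 + 1) else d)
    PySem.Dict.empty

-- ===== PORT A =====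
def find_catchphrases_py (texts : List String) (min_occurrences : Int) : List String :=
  let phrase_counts := pvCountPhrases texts
  PySem.List.slice
    (((PySem.List.sorted phrase_counts.items (fun x => -x.2)).filter
        (fun pc => decide (min_occurrences ≤ pc.2))).map (fun pc => pc.1))
    none (some 5)

-- ===== PORT B =====
def find_catchphrases_py_alt (texts : List String) (min_occurrences : Int) : List String :=
  let counts := pvCountPhrases texts
  let buckets := counts.items.foldl
    (fun b pc => b.modify pc.2 [] (fun t => t ++ [pc.1])) PySem.Dict.empty
  let lo := max min_occurrences 1
  let result := (PySem.List.pyRange (PySem.List.maxD buckets.keys (fun c => c) 0) (lo - 1) (-1)).foldl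
    (fun acc c => acc ++ buckets.getD c []) []
  PySem.List.slice result none (some 5)

-- ===== PRECONDITION & SPEC =====
def Spec_find_catchphrases_py (texts : List String) (min_occurrences : Int) (out : List String) : Prop := out = find_catchphrases_py_alt texts min_occurrences
instance (texts : List String) (min_occurrences : Int) (out : List String) : Decidable (Spec_find_catchphrases_py texts min_occurrences out) := by unfold Spec_find_catchphrases_py; infer_instance

-- ===== CLAIM (what is proved, stated in full; the proofs are below) =====
def Claim_equal_find_catchphrases_py : Prop := ∀ (texts : List String) (min_occurrences : Int), Dom_find_catchphrases_py texts min_occurrences → Spec_find_catchphrases_py texts min_occurrences (find_catchphrases_py texts min_occurrences)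

-- ===== LEMMAS AND PROOFS =====

-- [maxc, maxc-1, …] with n entries; proof-side image of range(maxc, lo-1, -1)
def pvDescN : Int → Nat → List Int
  | _, 0 => []
  | hi, Nat.succ n => hi :: pvDescN (hi - 1) n

theorem pvDescN_eq_map_range (n : Nat) : ∀ (a : Int), pvDescN a n = (List.range n).map (fun (k : Nat) => a - (k : Int)) := by
  induction n with
  | zero => intro a; rfl
  | succ n ih =>
      intro a
      rw [List.range_succ_eq_map, List.map_cons, List.map_map]
      show a :: pvDescN (a - 1) n = _ :: _
      rw [ih]
      congr 1
      · norm_num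
      · apply List.map_congr_left
        intro k _
        simp only [Function.comp_apply]
        push_cast
        ring

theorem pv_pyRange_neg_one (a b : Int) : PySem.List.pyRange a b (-1) = pvDescN a (a - b).toNat := by
  rw [pvDescN_eq_map_range]
  simp only [PySem.List.pyRange]
  rw [if_neg (by norm_num), if_neg (by norm_num)]
  by_cases h : b < a
  · rw [if_pos h]
    have h1 : (a - b + - -1 - 1) / - -1 = a - b := by norm_num
    rw [h1]
    apply List.map_congr_left
    intro k _
    ring
  · rw [if_neg h]
    have h1 : (a - b).toNat = 0 := by omega
    rw [h1]
    rfl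

theorem pv_mem_descN : ∀ (n : Nat) (hi c : Int), c ∈ pvDescN hi n → hi - n < c ∧ c ≤ hi := by
  intro n
  induction n with
  | zero => intro hi c h; simp [pvDescN] at h
  | succ n ih =>
      intro hi c h
      rcases List.mem_cons.mp h with rfl | h
      · push_cast; omega
      · have := ih (hi - 1) c h; push_cast at this ⊢; omega

theorem pv_filter_descN (lo : Int) : ∀ (n : Nat) (hi : Int),
    (pvDescN hi n).filter (fun c => decide (lo ≤ c)) = pvDescN hi (min n (hi - lo + 1).toNat) := by
  intro n
  induction n with
  | zero => intro hi; simp [pvDescN]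
  | succ n ih =>
      intro hi
      by_cases h : lo ≤ hi
      · have h1 : (hi - lo + 1).toNat = (hi - 1 - lo + 1).toNat + 1 := by omega
        rw [show pvDescN hi (n+1) = hi :: pvDescN (hi - 1) n from rfl]
        rw [List.filter_cons_of_pos (by simpa using h), ih (hi - 1), h1,
            Nat.succ_min_succ]
        rfl
      · have h1 : (hi - lo + 1).toNat = 0 := by omega
        have h2 : (hi - 1 - lo + 1).toNat = 0 := by omega
        rw [show pvDescN hi (n+1) = hi :: pvDescN (hi - 1) n from rfl]
        rw [List.filter_cons_of_neg (by simpa using h), ih (hi - 1), h1, h2]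
        simp [pvDescN]

theorem pv_flatMap_ite {α : Type} (l : List Int) (p : Int → Prop) [DecidablePred p] (G : Int → List α) :
    l.flatMap (fun c => if p c then G c else []) = (l.filter (fun c => decide (p c))).flatMap G := by
  induction l with
  | nil => rfl
  | cons c l ih =>
      by_cases h : p c
      · rw [List.flatMap_cons, if_pos h, List.filter_cons_of_pos (by simp [h]), List.flatMap_cons, ih]
      · rw [List.flatMap_cons, if_neg h, List.filter_cons_of_neg (by simp [h]), ih]
        simp

theorem pv_insertBy_prefix {α : Type} (before : α → α → Bool) (x : α) :
    ∀ (P ys : List α), (∀ y ∈ P, before x y = false) →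
      PySem.List.insertBy before x (P ++ ys) = P ++ PySem.List.insertBy before x ys := by
  intro P
  induction P with
  | nil => intro ys _; rfl
  | cons p P ih =>
      intro ys h
      have hp : before x p = false := h p (by simp)
      simp only [List.cons_append, PySem.List.insertBy, hp]
      simp [ih ys (fun y hy => h y (by simp [hy]))]

theorem pv_insertBy_all_true {α : Type} (before : α → α → Bool) (x : α) :
    ∀ (S : List α), (∀ y ∈ S, before x y = true) →
      PySem.List.insertBy before x S = x :: S := by
  intro S h
  cases S with
  | nil => rfl
  | cons s S => simp [PySem.List.insertBy, h s (by simp)]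

theorem pv_flatMap_congr {α β : Type} (l : List α) (f g : α → List β)
    (h : ∀ a ∈ l, f a = g a) : l.flatMap f = l.flatMap g := by
  induction l with
  | nil => rfl
  | cons a l ih =>
      simp only [List.flatMap_cons, h a (by simp), ih (fun a ha => h a (by simp [ha]))]

-- inserting one element into the bucketed flatten lands at the end of its own bucket
theorem pv_insert_flat (x : String × Int) :
    ∀ (n : Nat) (hi : Int) (F : Int → List (String × Int)),
      (∀ c p, p ∈ F c → p.2 = c) → hi - n < x.2 → x.2 ≤ hi →
      PySem.List.insertBy (fun a b => decide (-(a.2) < -(b.2))) x ((pvDescN hi n).flatMap F)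
        = (pvDescN hi n).flatMap (fun c => F c ++ if x.2 = c then [x] else []) := by
  intro n
  induction n with
  | zero => intro hi F _ h1 h2; omega
  | succ n ih =>
      intro hi F hF h1 h2
      have hstep : pvDescN hi (n+1) = hi :: pvDescN (hi - 1) n := rfl
      rw [hstep, List.flatMap_cons, List.flatMap_cons]
      by_cases hx : x.2 = hi
      · have hP : ∀ y ∈ F hi, (fun a b => decide (-(a.2 : Int) < -(b.2))) x y = false := by
          intro y hy
          have := hF hi y hy
          simp only [decide_eq_false_iff_not]
          omega
        have hS : ∀ y ∈ (pvDescN (hi - 1) n).flatMap F,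
            (fun a b => decide (-(a.2 : Int) < -(b.2))) x y = true := by
          intro y hy
          rcases List.mem_flatMap.mp hy with ⟨c, hc, hyc⟩
          have hy2 := hF c y hyc
          have := pv_mem_descN n (hi - 1) c hc
          simp only [decide_eq_true_eq]
          omega
        rw [pv_insertBy_prefix _ _ _ _ hP, pv_insertBy_all_true _ _ _ hS]
        have hrest : (pvDescN (hi - 1) n).flatMap (fun c => F c ++ if x.2 = c then [x] else [])
            = (pvDescN (hi - 1) n).flatMap F := by
          apply pv_flatMap_congr
          intro c hc
          have := pv_mem_descN n (hi - 1) c hc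
          have : ¬ (x.2 = c) := by omega
          simp [this]
        rw [hrest, if_pos hx]
        simp
      · have hP : ∀ y ∈ F hi, (fun a b => decide (-(a.2 : Int) < -(b.2))) x y = false := by
          intro y hy
          have := hF hi y hy
          simp only [decide_eq_false_iff_not]
          omega
        rw [pv_insertBy_prefix _ _ _ _ hP, ih (hi - 1) F hF (by push_cast at h1 ⊢; omega) (by omega)]
        rw [if_neg hx]
        simp

-- A's stable insertion sort by descending count IS the bucketed flatten
theorem pv_foldl_sorted (l : List (String × Int)) (hi : Int) (hhi : 0 ≤ hi)
    (hb : ∀ p ∈ l, 1 ≤ p.2 ∧ p.2 ≤ hi) :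
    l.foldl (fun acc x => PySem.List.insertBy (fun a b => decide (-(a.2) < -(b.2))) x acc) []
      = (pvDescN hi hi.toNat).flatMap (fun c => l.filter (fun p => p.2 == c)) := by
  induction l using List.reverseRecOn with
  | nil =>
      simp only [List.foldl_nil]
      rw [pv_flatMap_congr _ _ (fun _ => []) (by intro a _; simp)]
      simp
  | append_singleton l x ih =>
      rw [List.foldl_append, List.foldl_cons, List.foldl_nil]
      rw [ih (fun p hp => hb p (by simp [hp]))]
      have hx := hb x (by simp)
      rw [pv_insert_flat x hi.toNat hi _
            (by intro c p hp; exact (by simpa using (List.mem_filter.mp hp).2))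
            (by omega) (by omega)]
      apply pv_flatMap_congr
      intro c _
      rw [List.filter_append]
      congr 1
      by_cases h : x.2 = c
      · simp [List.filter, h]
      · have hb : (x.2 == c) = false := by simp [h]
        simp [List.filter, hb, h]

-- keys of the bucket dict: membership transport through the fold
theorem pv_keys_mono : ∀ (l : List (String × Int)) (d : PySem.Dict Int (List String)) (k : Int),
    k ∈ d.keys → k ∈ (l.foldl (fun b pc => b.modify pc.2 [] (fun t => t ++ [pc.1])) d).keys := by
  intro l
  induction l with
  | nil => intro d k h; exact h
  | cons pc l ih =>
      intro d k h
      refine ih _ k ?_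
      rw [PySem.Dict.keys_modify]
      exact (PySem.Dict.mem_keys_insert _ _ _ _).mpr (Or.inr h)

theorem pv_keys_mem : ∀ (l : List (String × Int)) (d : PySem.Dict Int (List String)) (q : String × Int),
    q ∈ l → q.2 ∈ (l.foldl (fun b pc => b.modify pc.2 [] (fun t => t ++ [pc.1])) d).keys := by
  intro l
  induction l with
  | nil => intro d q h; simp at h
  | cons pc l ih =>
      intro d q h
      rcases List.mem_cons.mp h with rfl | h
      · refine pv_keys_mono l _ _ ?_
        rw [PySem.Dict.keys_modify]
        exact (PySem.Dict.mem_keys_insert _ _ _ _).mpr (Or.inl rfl)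
      · exact ih _ q h

theorem pv_keys_rev : ∀ (l : List (String × Int)) (d : PySem.Dict Int (List String)) (k : Int),
    k ∈ (l.foldl (fun b pc => b.modify pc.2 [] (fun t => t ++ [pc.1])) d).keys →
    k ∈ d.keys ∨ ∃ q ∈ l, k = q.2 := by
  intro l
  induction l with
  | nil => intro d k h; exact Or.inl h
  | cons pc l ih =>
      intro d k h
      rcases ih _ k h with h' | ⟨q, hq, hk⟩
      · rw [PySem.Dict.keys_modify] at h'
        rcases (PySem.Dict.mem_keys_insert _ _ _ _).mp h' with h'' | h''
        · exact Or.inr ⟨pc, by simp, h''⟩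
        · exact Or.inl h''
      · exact Or.inr ⟨q, by simp [hq], hk⟩

theorem pv_le_maxD (xs : List Int) (x : Int) (hx : x ∈ xs) :
    x ≤ PySem.List.maxD xs (fun c => c) 0 := by
  cases hm : PySem.List.max? xs (fun c => c) with
  | none => rw [PySem.List.max?_eq_none_iff] at hm; subst hm; simp at hx
  | some m =>
      have := PySem.List.max?_isMax hm x hx
      simpa [PySem.List.maxD, hm] using this

theorem pv_maxD_cases (xs : List Int) :
    PySem.List.maxD xs (fun c => c) 0 = 0 ∨ PySem.List.maxD xs (fun c => c) 0 ∈ xs := by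
  cases hm : PySem.List.max? xs (fun c => c) with
  | none => left; simp [PySem.List.maxD, hm]
  | some m => right; simpa [PySem.List.maxD, hm] using PySem.List.max?_mem hm

-- bucket contents: bucket c holds (in order) the phrases whose count is c
theorem pv_bucket_getD (items : List (String × Int)) (c : Int) :
    (items.foldl (fun b pc => b.modify pc.2 [] (fun t => t ++ [pc.1])) PySem.Dict.empty).getD c []
      = (items.filter (fun p => p.2 == c)).map (fun p => p.1) := by
  have h1 : items.foldl (fun b pc => b.modify pc.2 [] (fun t => t ++ [pc.1])) PySem.Dict.empty
      = (items.map Prod.swap).foldl (fun b q => b.modify q.1 [] (fun t => t ++ [q.2])) PySem.Dict.empty := by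
    rw [List.foldl_map]
    simp only [Prod.fst_swap, Prod.snd_swap]
  rw [h1, PySem.Dict.getD_foldl_modify_append]
  have h2 : (items.map Prod.swap).filter (fun q => q.1 == c)
      = (items.filter (fun p => p.2 == c)).map Prod.swap := by
    rw [List.filter_map]
    rfl
  rw [h2]
  simp [List.map_map, PySem.Dict.getD_empty]

-- per-bucket threshold filter is all-or-nothing
theorem pv_filter_bucket (L : List (String × Int)) (m c : Int) :
    (L.filter (fun p => p.2 == c)).filter (fun p => decide (m ≤ p.2))
      = if m ≤ c then L.filter (fun p => p.2 == c) else [] := by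
  induction L with
  | nil => simp
  | cons p L ih =>
      by_cases hpc : p.2 = c
      · by_cases hmc : m ≤ c
        · simp [List.filter, hpc, hmc, ih]
        · simp [List.filter, hpc, hmc, ih]
      · have hb : (p.2 == c) = false := by simp [hpc]
        simp [List.filter, hb, ih]

-- A's normalise-and-count loop builds Counter(ns)
def pvNs (texts : List String) : List String :=
  (texts.filter (fun t => decide (PySem.Str.len (pvNorm t) < 50))).map pvNorm

theorem pv_counts_fold (texts : List String) :
    ∀ (d : PySem.Dict String Int),
      texts.foldl (fun d text =>
        if PySem.Str.len (pvNorm text) < 50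
        then d.insert (pvNorm text) (d.getD (pvNorm text) 0 + 1) else d) d
      = (pvNs texts).foldl (fun d n => d.insert n (d.getD n 0 + 1)) d := by
  induction texts with
  | nil => intro d; rw [show pvNs ([] : List String) = [] from rfl, List.foldl_nil, List.foldl_nil]
  | cons t ts ih =>
      intro d
      by_cases h : PySem.Str.len (pvNorm t) < 50
      · have hns : pvNs (t :: ts) = pvNorm t :: pvNs ts := by
          unfold pvNs
          rw [List.filter_cons_of_pos (p := fun s => decide (PySem.Str.len (pvNorm s) < 50))
                (decide_eq_true h), List.map_cons]
        rw [hns]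
        simp only [List.foldl_cons]
        rw [if_pos h]
        exact ih _
      · have hns : pvNs (t :: ts) = pvNs ts := by
          unfold pvNs
          rw [List.filter_cons_of_neg (p := fun s => decide (PySem.Str.len (pvNorm s) < 50))
                (by simp only [decide_eq_true_eq]; exact h)]
        rw [hns]
        simp only [List.foldl_cons]
        rw [if_neg h]
        exact ih _

theorem pv_counts_eq (texts : List String) :
    pvCountPhrases texts = PySem.Dict.counter (pvNs texts) := by
  unfold pvCountPhrases
  simp only []
  rw [pv_counts_fold]
  exact PySem.Dict.foldl_insert_getD_add_one_eq_counter _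

-- the core equality, for any item list with positive counts
theorem pv_core (items : List (String × Int)) (m : Int) (hpos : ∀ p ∈ items, 1 ≤ p.2) :
    ((PySem.List.sorted items (fun x => -x.2)).filter (fun pc => decide (m ≤ pc.2))).map (fun pc => pc.1)
      = (PySem.List.pyRange
          (PySem.List.maxD
            (items.foldl (fun b pc => b.modify pc.2 [] (fun t => t ++ [pc.1])) PySem.Dict.empty).keys
            (fun c => c) 0)
          (max m 1 - 1) (-1)).foldl
        (fun acc c => acc ++
          (items.foldl (fun b pc => b.modify pc.2 [] (fun t => t ++ [pc.1])) PySem.Dict.empty).getD c [])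
        [] := by
  set buckets := items.foldl (fun b pc => b.modify pc.2 [] (fun t => t ++ [pc.1])) PySem.Dict.empty with hbk
  set maxc := PySem.List.maxD buckets.keys (fun c => c) 0 with hmx
  have hmax0 : 0 ≤ maxc := by
    rcases pv_maxD_cases buckets.keys with h | h
    · omega
    · rcases pv_keys_rev items PySem.Dict.empty maxc (by rw [← hbk]; exact h) with h' | ⟨q, hq, hk⟩
      · simp [PySem.Dict.keys_empty] at h'
      · have := hpos q hq; omega
  have hbound : ∀ p ∈ items, 1 ≤ p.2 ∧ p.2 ≤ maxc := by
    intro p hp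
    refine ⟨hpos p hp, ?_⟩
    exact pv_le_maxD _ _ (by rw [hbk]; exact pv_keys_mem items PySem.Dict.empty p hp)
  set lo := max m 1 with hlo
  -- A side
  rw [PySem.List.sorted_eq_foldl_insertBy, pv_foldl_sorted items maxc hmax0 hbound,
      List.filter_flatMap]
  have hstep1 : (pvDescN maxc maxc.toNat).flatMap
      (fun c => (items.filter (fun p => p.2 == c)).filter (fun p => decide (m ≤ p.2)))
      = (pvDescN maxc maxc.toNat).flatMap
      (fun c => if lo ≤ c then items.filter (fun p => p.2 == c) else []) := by
    apply pv_flatMap_congr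
    intro c hc
    have hcm := pv_mem_descN _ _ _ hc
    rw [pv_filter_bucket]
    have : (m ≤ c) ↔ (lo ≤ c) := by omega
    by_cases h : lo ≤ c
    · rw [if_pos (this.mpr h), if_pos h]
    · rw [if_neg (fun hh => h (this.mp hh)), if_neg h]
  rw [hstep1, pv_flatMap_ite, pv_filter_descN, List.map_flatMap]
  -- B side
  rw [pv_pyRange_neg_one, PySem.List.foldl_append_eq_flatMap, List.nil_append]
  have h1lo : 1 ≤ lo := le_max_right m 1
  have hn : min maxc.toNat (maxc - lo + 1).toNat = (maxc - (lo - 1)).toNat := by omega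
  rw [hn]
  apply pv_flatMap_congr
  intro c _
  rw [pv_bucket_getD]

-- ===== VERDICT (by name: the statement is the Claim_ definition above) =====
theorem find_catchphrases_py_spec : Claim_equal_find_catchphrases_py := by
  intro texts min_occurrences _
  unfold Spec_find_catchphrases_py
  simp only [find_catchphrases_py, find_catchphrases_py_alt]
  congr 1
  apply pv_core
  intro p hp
  rw [pv_counts_eq, PySem.Dict.items_counter] at hp
  rcases List.mem_map.mp hp with ⟨k, hk, rfl⟩
  have h1 : 1 ≤ List.count k (pvNs texts) :=
    List.count_pos_iff.mpr ((PySem.Set.mem_ofList _ _).mp hk)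
  simpa using h1
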